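-- pv_equiv track=rewrite | github.com/Dheebz/advent-of-code | src/python/year_2019/solution_2019_day_25.py | parse_room
-- ===== SOURCE A (Python) =====
-- from typing import TYPE_CHECKING, Dict, List, Set, Tuple
--
-- def parse_room(output: str) -> Tuple[str, List[str], List[str]]:
--     """Parse room description into name, doors, and items.
--
--     Args:
--         output (str): Text output from the machine.
--
--     Returns:
--         Tuple[str, List[str], List[str]]: Room name, available doors, and items present.
--     """
--     lines = [line.strip() for line in output.splitlines() if line.strip()]
--     name = ""
--     doors: List[str] = []
--     items: List[str] = []
--     i = 0
--     while i < len(lines):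
--         line = lines[i]
--         if line.startswith("=="):
--             name = line.strip("= ").strip()
--         elif line.startswith("Doors here lead:"):
--             i += 1
--             while i < len(lines) and lines[i].startswith("-"):
--                 doors.append(lines[i][2:])
--                 i += 1
--             continue
--         elif line.startswith("Items here:"):
--             i += 1
--             while i < len(lines) and lines[i].startswith("-"):
--                 items.append(lines[i][2:])
--                 i += 1
--             continue
--         i += 1
--     return name, doors, items
-- ===== SOURCE B (Python) =====
-- def parse_room(output):
--     """Parse room description into name, doors, and items (single state-machine pass)."""
--     lines = [line.strip() for line in output.splitlines() if line.strip()]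
--     name = ""
--     doors = []
--     items = []
--     mode = None
--     for line in lines:
--         if line.startswith("=="):
--             name = line.strip("= ").strip()
--             mode = None
--         elif line.startswith("Doors here lead:"):
--             mode = "doors"
--         elif line.startswith("Items here:"):
--             mode = "items"
--         elif line.startswith("-"):
--             if mode == "doors":
--                 doors.append(line[2:])
--             elif mode == "items":
--                 items.append(line[2:])
--         else:
--             mode = None
--     return name, doors, items
-- ===== Notes on version B (the rewrite author's own statement) =====
-- stated objective: simpler
-- what changed: Replaced the index-based while loop with nested lookahead loops by a single flat for-loop over the stripped lines that keeps a mode variable (None/'doors'/'items') and dispatches each line once.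
import Mathlib
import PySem

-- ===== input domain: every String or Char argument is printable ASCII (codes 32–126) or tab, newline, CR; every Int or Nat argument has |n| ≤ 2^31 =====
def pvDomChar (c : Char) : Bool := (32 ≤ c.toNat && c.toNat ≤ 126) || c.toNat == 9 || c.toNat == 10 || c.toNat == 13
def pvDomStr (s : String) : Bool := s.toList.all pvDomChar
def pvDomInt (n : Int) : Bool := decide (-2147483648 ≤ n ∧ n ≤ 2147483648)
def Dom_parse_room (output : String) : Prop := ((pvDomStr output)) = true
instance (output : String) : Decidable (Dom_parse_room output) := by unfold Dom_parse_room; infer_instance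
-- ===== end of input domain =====

-- B rewrites A's index-based while loop with inner lookahead loops as one flat
-- state-machine pass over the lines (objective: simpler); same return value, no side effects.

-- ===== PORT A =====
-- lines = [line.strip() for line in output.splitlines() if line.strip()]
def pvLines (output : String) : List String :=
  (PySem.Str.splitlines output).filterMap
    (fun l => let s := PySem.Str.strip l; if s = "" then none else some s)

-- the inner 'while i < len(lines) and lines[i].startswith("-")' loops of A:
-- collect lines[i][2:] while they start with "-", return (collected, remaining)
def pvConsume (lines : List String) : List String × List String :=
  match lines with
  | [] => ([], [])
  | l :: rest =>
    if PySem.Str.startswith l "-" then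
      let p := pvConsume rest
      (PySem.Str.slice l (some 2) none :: p.1, p.2)
    else ([], l :: rest)

theorem pvConsume_len (lines : List String) : (pvConsume lines).2.length ≤ lines.length := by
  induction lines with
  | nil => simp [pvConsume]
  | cons l rest ih =>
    simp only [pvConsume]
    split
    · simpa using Nat.le_succ_of_le ih
    · simp

-- the outer while loop of A
def pvLoopA : List String → String → List String → List String → String × List String × List String
  | [], name, doors, items => (name, doors, items)
  | l :: rest, name, doors, items =>
    if PySem.Str.startswith l "==" then
      pvLoopA rest (PySem.Str.strip (PySem.Str.stripChars l "= ")) doors items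
    else if PySem.Str.startswith l "Doors here lead:" then
      pvLoopA (pvConsume rest).2 name (doors ++ (pvConsume rest).1) items
    else if PySem.Str.startswith l "Items here:" then
      pvLoopA (pvConsume rest).2 name doors (items ++ (pvConsume rest).1)
    else
      pvLoopA rest name doors items
  termination_by lines _ _ _ => lines.length
  decreasing_by
  · simp
  · exact Nat.lt_succ_of_le (pvConsume_len rest)
  · exact Nat.lt_succ_of_le (pvConsume_len rest)
  · simp

def parse_room (output : String) : String × List String × List String :=
  pvLoopA (pvLines output) "" [] []

-- ===== PORT B =====
-- one step of B's for-loop; mode: none, some true ('doors'), some false ('items')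
def pvStepB (st : String × List String × List String × Option Bool) (l : String) :
    String × List String × List String × Option Bool :=
  let (name, doors, items, mode) := st
  if PySem.Str.startswith l "==" then
    (PySem.Str.strip (PySem.Str.stripChars l "= "), doors, items, none)
  else if PySem.Str.startswith l "Doors here lead:" then
    (name, doors, items, some true)
  else if PySem.Str.startswith l "Items here:" then
    (name, doors, items, some false)
  else if PySem.Str.startswith l "-" then
    match mode with
    | some true => (name, doors ++ [PySem.Str.slice l (some 2) none], items, mode)
    | some false => (name, doors, items ++ [PySem.Str.slice l (some 2) none], mode)
    | none => (name, doors, items, none)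
  else
    (name, doors, items, none)

def parse_room_alt (output : String) : String × List String × List String :=
  let st := (pvLines output).foldl pvStepB ("", [], [], none)
  (st.1, st.2.1, st.2.2.1)

-- ===== PRECONDITION & SPEC =====
def Spec_parse_room (output : String) (out : String × List String × List String) : Prop := out = parse_room_alt output
instance (output : String) (out : String × List String × List String) : Decidable (Spec_parse_room output out) := by unfold Spec_parse_room; infer_instance

-- ===== CLAIM (what is proved, stated in full; the proofs are below) =====
def Claim_equal_parse_room : Prop := ∀ (output : String), Dom_parse_room output → Spec_parse_room output (parse_room output)

-- ===== LEMMAS AND PROOFS =====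

-- B's result seen through the final projection
def pvRunB (st : String × List String × List String × Option Bool) (lines : List String) :
    String × List String × List String :=
  let r := lines.foldl pvStepB st
  (r.1, r.2.1, r.2.2.1)

-- a step on a non-dash line does not depend on the current mode
theorem pvStepB_mode_irrel (l : String) (n : String) (d i : List String) (m m' : Option Bool)
    (h : PySem.Str.startswith l "-" = false) :
    pvStepB (n, d, i, m) l = pvStepB (n, d, i, m') l := by
  simp only [pvStepB]
  simp at h
  split_ifs <;> first | rfl | simp_all

-- in 'doors' mode, B consumes exactly the dash prefix that A's inner loop consumes
theorem pvRunB_doors (rest : List String) (n : String) (d i : List String) :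
    pvRunB (n, d, i, some true) rest
      = pvRunB (n, d ++ (pvConsume rest).1, i, none) (pvConsume rest).2 := by
  induction rest generalizing d with
  | nil => simp [pvConsume, pvRunB]
  | cons l t ih =>
    by_cases h : PySem.Str.startswith l "-" = true
    · have hne : ¬ (PySem.Str.startswith l "==" = true) := by
        intro hc
        have := (PySem.Chars.startswith_iff _ _).mp (by simpa using hc)
        have h2 := (PySem.Chars.startswith_iff _ _).mp (by simpa using h)
        rcases this with ⟨t1, ht1⟩
        rcases h2 with ⟨t2, ht2⟩
        rw [← ht2] at ht1
        simp at ht1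
      have hne2 : ¬ (PySem.Str.startswith l "Doors here lead:" = true) := by
        intro hc
        have := (PySem.Chars.startswith_iff _ _).mp (by simpa using hc)
        have h2 := (PySem.Chars.startswith_iff _ _).mp (by simpa using h)
        rcases this with ⟨t1, ht1⟩
        rcases h2 with ⟨t2, ht2⟩
        rw [← ht2] at ht1
        simp at ht1
      have hne3 : ¬ (PySem.Str.startswith l "Items here:" = true) := by
        intro hc
        have := (PySem.Chars.startswith_iff _ _).mp (by simpa using hc)
        have h2 := (PySem.Chars.startswith_iff _ _).mp (by simpa using h)
        rcases this with ⟨t1, ht1⟩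
        rcases h2 with ⟨t2, ht2⟩
        rw [← ht2] at ht1
        simp at ht1
      simp only [pvConsume, h, if_pos]
      have hstep : pvStepB (n, d, i, some true) l
          = (n, d ++ [PySem.Str.slice l (some 2) none], i, some true) := by
        simp only [pvStepB]
        simp at hne hne2 hne3 h
        simp [hne, hne2, hne3, h]
      simp only [pvRunB, List.foldl_cons, hstep]
      have := ih (d ++ [PySem.Str.slice l (some 2) none])
      simpa [pvRunB, List.append_assoc] using this
    · have h' : PySem.Str.startswith l "-" = false := by simpa using h
      simp only [pvConsume, h', Bool.false_eq_true, if_neg, not_false_iff]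
      simp only [pvRunB, List.foldl_cons]
      rw [pvStepB_mode_irrel l n d i (some true) none h']
      simp

-- the symmetric fact for 'items' mode
theorem pvRunB_items (rest : List String) (n : String) (d i : List String) :
    pvRunB (n, d, i, some false) rest
      = pvRunB (n, d, i ++ (pvConsume rest).1, none) (pvConsume rest).2 := by
  induction rest generalizing i with
  | nil => simp [pvConsume, pvRunB]
  | cons l t ih =>
    by_cases h : PySem.Str.startswith l "-" = true
    · have hne : ¬ (PySem.Str.startswith l "==" = true) := by
        intro hc
        have := (PySem.Chars.startswith_iff _ _).mp (by simpa using hc)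
        have h2 := (PySem.Chars.startswith_iff _ _).mp (by simpa using h)
        rcases this with ⟨t1, ht1⟩
        rcases h2 with ⟨t2, ht2⟩
        rw [← ht2] at ht1
        simp at ht1
      have hne2 : ¬ (PySem.Str.startswith l "Doors here lead:" = true) := by
        intro hc
        have := (PySem.Chars.startswith_iff _ _).mp (by simpa using hc)
        have h2 := (PySem.Chars.startswith_iff _ _).mp (by simpa using h)
        rcases this with ⟨t1, ht1⟩
        rcases h2 with ⟨t2, ht2⟩
        rw [← ht2] at ht1
        simp at ht1
      have hne3 : ¬ (PySem.Str.startswith l "Items here:" = true) := by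
        intro hc
        have := (PySem.Chars.startswith_iff _ _).mp (by simpa using hc)
        have h2 := (PySem.Chars.startswith_iff _ _).mp (by simpa using h)
        rcases this with ⟨t1, ht1⟩
        rcases h2 with ⟨t2, ht2⟩
        rw [← ht2] at ht1
        simp at ht1
      simp only [pvConsume, h, if_pos]
      have hstep : pvStepB (n, d, i, some false) l
          = (n, d, i ++ [PySem.Str.slice l (some 2) none], some false) := by
        simp only [pvStepB]
        simp at hne hne2 hne3 h
        simp [hne, hne2, hne3, h]
      simp only [pvRunB, List.foldl_cons, hstep]
      have := ih (i ++ [PySem.Str.slice l (some 2) none])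
      simpa [pvRunB, List.append_assoc] using this
    · have h' : PySem.Str.startswith l "-" = false := by simpa using h
      simp only [pvConsume, h', Bool.false_eq_true, if_neg, not_false_iff]
      simp only [pvRunB, List.foldl_cons]
      rw [pvStepB_mode_irrel l n d i (some false) none h']
      simp

-- main invariant: A's outer loop equals B's fold started with mode = none
theorem pvLoopA_eq_runB (lines : List String) (n : String) (d i : List String) :
    pvLoopA lines n d i = pvRunB (n, d, i, none) lines := by
  fun_induction pvLoopA lines n d i with
  | case1 name doors items => simp [pvRunB]
  | case2 l rest name doors items h ih =>
    simp only [pvRunB, List.foldl_cons]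
    have hstep : pvStepB (name, doors, items, none) l
        = (PySem.Str.strip (PySem.Str.stripChars l "= "), doors, items, none) := by
      simp only [pvStepB]
      simp at h
      simp [h]
    rw [hstep]
    simpa [pvRunB] using ih
  | case3 l rest name doors items h1 h2 ih =>
    simp only [pvRunB, List.foldl_cons]
    have hstep : pvStepB (name, doors, items, none) l = (name, doors, items, some true) := by
      simp only [pvStepB]
      simp at h1 h2
      simp [h1, h2]
    rw [hstep]
    rw [show (List.foldl pvStepB (name, doors, items, some true) rest).1 = (pvRunB (name, doors, items, some true) rest).1 from rfl]
    calc pvLoopA (pvConsume rest).2 name (doors ++ (pvConsume rest).1) items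
        = pvRunB (name, doors ++ (pvConsume rest).1, items, none) (pvConsume rest).2 := ih
      _ = pvRunB (name, doors, items, some true) rest := (pvRunB_doors rest name doors items).symm
  | case4 l rest name doors items h1 h2 h3 ih =>
    simp only [pvRunB, List.foldl_cons]
    have hstep : pvStepB (name, doors, items, none) l = (name, doors, items, some false) := by
      simp only [pvStepB]
      simp at h1 h2 h3
      simp [h1, h2, h3]
    rw [hstep]
    calc pvLoopA (pvConsume rest).2 name doors (items ++ (pvConsume rest).1)
        = pvRunB (name, doors, items ++ (pvConsume rest).1, none) (pvConsume rest).2 := ih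
      _ = pvRunB (name, doors, items, some false) rest := (pvRunB_items rest name doors items).symm
  | case5 l rest name doors items h1 h2 h3 ih =>
    simp only [pvRunB, List.foldl_cons]
    by_cases hd : PySem.Str.startswith l "-" = true
    · have hstep : pvStepB (name, doors, items, none) l = (name, doors, items, none) := by
        simp only [pvStepB]
        simp at h1 h2 h3 hd
        simp [h1, h2, h3, hd]
      rw [hstep]; simpa [pvRunB] using ih
    · have hd' : PySem.Str.startswith l "-" = false := by simpa using hd
      have hstep : pvStepB (name, doors, items, none) l = (name, doors, items, none) := by
        simp only [pvStepB]
        simp at h1 h2 h3 hd'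
        simp [h1, h2, h3, hd']
      rw [hstep]; simpa [pvRunB] using ih

-- ===== VERDICT (by name: the statement is the Claim_ definition above) =====
theorem parse_room_spec : Claim_equal_parse_room := by
  intro output _
  unfold Spec_parse_room parse_room parse_room_alt
  simpa [pvRunB] using pvLoopA_eq_runB (pvLines output) "" [] []
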